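-- pv_equiv track=rewrite | github.com/JaViLuMa/AdventOfCode2021 | J - Advent - 10.py | part1
-- ===== SOURCE A (Python) =====
-- def part1(lines):
--   counter = 0
--
--   for x in lines:
--     while True:
--       if '()' in x:
--         x = x.replace('()', '')
--       elif '[]' in x:
--         x = x.replace('[]', '')
--
--       elif '{}' in x:
--         x = x.replace('{}', '')
--
--       elif '<>' in x:
--         x = x.replace('<>', '')
--
--       else:
--         break
--
--     for y in range(1, len(x)):
--       if x[y] == ')':
--         if x[y - 1] == '[' or x[y - 1] == '{' or x[y - 1] == '<':
--           counter += 3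
--           break
--
--       if x[y] == ']':
--         if x[y - 1] == '(' or x[y - 1] == '{' or x[y - 1] == '<':
--           counter += 57
--           break
--
--       if x[y] == '}':
--         if x[y - 1] == '(' or x[y - 1] == '[' or x[y - 1] == '<':
--           counter += 1197
--           break
--
--       if x[y] == '>':
--         if x[y - 1] == '(' or x[y - 1] == '{' or x[y - 1] == '[':
--           counter += 25137
--           break
--
--   return counter
-- ===== SOURCE B (Python) =====
-- # Alternative algorithm: one stack pass computes the pair-erasure normal form of each line, then one scan
-- # scores the first closer that immediately follows a non-matching opener.
-- PAIR = {'(': ')', '[': ']', '{': '}', '<': '>'}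
-- SCORE = {')': 3, ']': 57, '}': 1197, '>': 25137}
--
--
-- def part1(lines):
--     total = 0
--     for line in lines:
--         # normal form of repeatedly deleting adjacent matched bracket pairs
--         out = []
--         for c in line:
--             if out and PAIR.get(out[-1]) == c:
--                 out.pop()
--             else:
--                 out.append(c)
--         # first closer immediately after a non-matching opener
--         for prev, cur in zip(out, out[1:]):
--             if prev in PAIR and cur in SCORE and PAIR[prev] != cur:
--                 total += SCORE[cur]
--                 break
--     return total
-- ===== Notes on version B (the rewrite author's own statement) =====
-- stated objective: alternative
-- what changed: A repeatedly rescans and rebuilds each whole line with str.replace until no adjacent matched pair remains and then index-scans the residue; B computes the same pair-erasure normal form in a single stack pass per line and then scans the normal form's adjacent pairs once for the first closer after a non-matching opener; B avoids A's quadratic rebuilding but trades C-level replace calls for a per-character Python loop, so it is not measurably faster.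
import Mathlib
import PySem

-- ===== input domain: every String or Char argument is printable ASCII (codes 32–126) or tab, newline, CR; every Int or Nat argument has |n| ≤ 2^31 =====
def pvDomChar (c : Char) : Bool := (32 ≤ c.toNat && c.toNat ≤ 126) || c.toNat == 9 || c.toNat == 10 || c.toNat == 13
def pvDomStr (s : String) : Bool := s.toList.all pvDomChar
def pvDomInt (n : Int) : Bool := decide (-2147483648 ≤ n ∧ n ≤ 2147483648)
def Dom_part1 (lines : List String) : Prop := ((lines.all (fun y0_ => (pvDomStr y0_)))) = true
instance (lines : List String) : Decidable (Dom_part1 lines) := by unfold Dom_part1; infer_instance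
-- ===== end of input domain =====

-- B replaces A's repeated whole-string `str.replace` erasing passes by a single stack pass
-- computing the same normal form, then one adjacent-pair scan (objective: alternative algorithm).

-- ===== PORT A =====
-- the `while True: x = x.replace(oc, '')` pair-erasing loop of A; `fuel` is only a
-- totality guard (one unit per iteration; `x.length + 1` provably suffices, see
-- `pvReduceLoop_foldl` / `pvReduceLoop_noPair` below)
def pvReduceLoop : Nat → List Char → List Char
  | 0, x => x
  | fuel + 1, x =>
    if PySem.Chars.isIn ['(', ')'] x then pvReduceLoop fuel (PySem.Chars.replace x ['(', ')'] [])
    else if PySem.Chars.isIn ['[', ']'] x then pvReduceLoop fuel (PySem.Chars.replace x ['[', ']'] [])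
    else if PySem.Chars.isIn ['{', '}'] x then pvReduceLoop fuel (PySem.Chars.replace x ['{', '}'] [])
    else if PySem.Chars.isIn ['<', '>'] x then pvReduceLoop fuel (PySem.Chars.replace x ['<', '>'] [])
    else x

-- A's inner `for y in range(1, len(x))` scan with its `break`s (returns the score added
-- to counter); `fuel` is only a totality guard for the increasing index y (`x.length`
-- suffices); the Python indices x[y], x[y-1] are always in range here, so getElem is exact
def pvScanA (x : List Char) : Nat → Nat → Int
  | 0, _ => 0
  | fuel + 1, y =>
    if h : y < x.length then
      if x[y] = ')' ∧ ((x[y - 1]'(Nat.lt_of_le_of_lt (Nat.sub_le y 1) h)) = '[' ∨ (x[y - 1]'(Nat.lt_of_le_of_lt (Nat.sub_le y 1) h)) = '{' ∨ (x[y - 1]'(Nat.lt_of_le_of_lt (Nat.sub_le y 1) h)) = '<') then 3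
      else if x[y] = ']' ∧ ((x[y - 1]'(Nat.lt_of_le_of_lt (Nat.sub_le y 1) h)) = '(' ∨ (x[y - 1]'(Nat.lt_of_le_of_lt (Nat.sub_le y 1) h)) = '{' ∨ (x[y - 1]'(Nat.lt_of_le_of_lt (Nat.sub_le y 1) h)) = '<') then 57
      else if x[y] = '}' ∧ ((x[y - 1]'(Nat.lt_of_le_of_lt (Nat.sub_le y 1) h)) = '(' ∨ (x[y - 1]'(Nat.lt_of_le_of_lt (Nat.sub_le y 1) h)) = '[' ∨ (x[y - 1]'(Nat.lt_of_le_of_lt (Nat.sub_le y 1) h)) = '<') then 1197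
      else if x[y] = '>' ∧ ((x[y - 1]'(Nat.lt_of_le_of_lt (Nat.sub_le y 1) h)) = '(' ∨ (x[y - 1]'(Nat.lt_of_le_of_lt (Nat.sub_le y 1) h)) = '{' ∨ (x[y - 1]'(Nat.lt_of_le_of_lt (Nat.sub_le y 1) h)) = '[') then 25137
      else pvScanA x fuel (y + 1)
    else 0

def part1 (lines : List String) : Int :=
  lines.foldl
    (fun counter x =>
      let r := pvReduceLoop (x.toList.length + 1) x.toList
      counter + pvScanA r r.length 1)
    0

-- ===== PORT B =====
-- Source B's PAIR.get / SCORE.get on the two four-key literal dicts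
def pvPairOf (ch : Char) : Option Char :=
  if ch = '(' then some ')' else if ch = '[' then some ']'
  else if ch = '{' then some '}' else if ch = '<' then some '>' else none

def pvScoreOf (ch : Char) : Option Int :=
  if ch = ')' then some 3 else if ch = ']' then some 57
  else if ch = '}' then some 1197 else if ch = '>' then some 25137 else none

-- Source B's inner stack update (the Python list's TOP = the head of this list)
def pvStep (out : List Char) (c : Char) : List Char :=
  match out with
  | t :: rest => if pvPairOf t = some c then rest else c :: out
  | [] => [c]

-- Source B's normal-form pass: `for c in line: …`; the Python `out` (top at the end) is
-- this fold's list reversed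
def pvNormal (line : List Char) : List Char :=
  (line.foldl pvStep []).reverse

-- Source B's `for prev, cur in zip(out, out[1:])` scoring scan with its `break`
def pvScanPairs : List Char → Int
  | a :: b :: t =>
    if (pvPairOf a).isSome ∧ (pvScoreOf b).isSome ∧ pvPairOf a ≠ some b then (pvScoreOf b).getD 0
    else pvScanPairs (b :: t)
  | _ => 0

def part1_alt (lines : List String) : Int :=
  lines.foldl (fun total line => total + pvScanPairs (pvNormal line.toList)) 0

-- ===== PRECONDITION & SPEC =====
def Spec_part1 (lines : List String) (out : Int) : Prop := out = part1_alt lines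
instance (lines : List String) (out : Int) : Decidable (Spec_part1 lines out) := by unfold Spec_part1; infer_instance

-- ===== CLAIM (what is proved, stated in full; the proofs are below) =====
def Claim_equal_part1 : Prop := ∀ (lines : List String), Dom_part1 lines → Spec_part1 lines (part1 lines)

-- ===== LEMMAS AND PROOFS =====
-- `pvRpl` characterises `PySem.Chars.replace s [o, c] []` (proof device)
def pvRpl (o c : Char) : List Char → List Char
  | a :: b :: t => if a = o ∧ b = c then pvRpl o c t else a :: pvRpl o c (b :: t)
  | l => l

theorem pvReplaceGo_eq_rpl (o c : Char) :
    ∀ (fuel : Nat) (l acc : List Char), l.length ≤ fuel →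
      PySem.Chars.replace.go [o, c] [] fuel l acc = acc.reverse ++ pvRpl o c l := by
  intro fuel
  induction fuel with
  | zero =>
    intro l acc h
    have hl : l = [] := by cases l <;> simp_all
    subst hl
    rfl
  | succ n ih =>
    intro l acc h
    rcases l with _ | ⟨a, _ | ⟨b, t⟩⟩
    · show PySem.Chars.replace.go [o, c] [] (n + 1) [] acc = acc.reverse ++ pvRpl o c []
      have hr : pvRpl o c [] = [] := rfl
      rw [hr, List.append_nil]
      rfl
    · have hstep : PySem.Chars.replace.go [o, c] [] (n + 1) [a] acc
          = if List.isPrefixOf [o, c] [a] then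
              PySem.Chars.replace.go [o, c] [] n (List.drop 2 [a]) (List.reverse [] ++ acc)
            else PySem.Chars.replace.go [o, c] [] n [] (a :: acc) := rfl
      rw [hstep, if_neg (by simp [List.isPrefixOf])]
      rw [ih [] (a :: acc) (by simp)]
      have hr : pvRpl o c [] = [] := rfl
      have hr2 : pvRpl o c [a] = [a] := rfl
      rw [hr, hr2]
      simp
    · have hstep : PySem.Chars.replace.go [o, c] [] (n + 1) (a :: b :: t) acc
          = if List.isPrefixOf [o, c] (a :: b :: t) then
              PySem.Chars.replace.go [o, c] [] n (List.drop 2 (a :: b :: t)) (List.reverse [] ++ acc)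
            else PySem.Chars.replace.go [o, c] [] n (b :: t) (a :: acc) := rfl
      rw [hstep]
      simp only [List.length_cons] at h
      by_cases hp : List.isPrefixOf [o, c] (a :: b :: t) = true
      · obtain ⟨hoa, hcb⟩ : o = a ∧ c = b := by simpa [List.isPrefixOf] using hp
        subst hoa
        subst hcb
        rw [if_pos hp]
        have hr : pvRpl o c (o :: c :: t) = pvRpl o c t := by simp [pvRpl]
        rw [hr]
        simpa using ih t acc (by omega)
      · obtain hne : ¬(o = a ∧ c = b) := by
          intro hc; exact hp (by simp [List.isPrefixOf, hc.1, hc.2])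
        rw [if_neg hp]
        have : pvRpl o c (a :: b :: t) = a :: pvRpl o c (b :: t) := by
          simp only [pvRpl]
          rw [if_neg (by rintro ⟨rfl, rfl⟩; exact hne ⟨rfl, rfl⟩)]
        rw [this, ih (b :: t) (a :: acc) (by simp; omega)]
        simp

theorem pvReplace_eq_rpl (o c : Char) (s : List Char) :
    PySem.Chars.replace s [o, c] [] = pvRpl o c s := by
  unfold PySem.Chars.replace
  rw [if_neg (by simp)]
  simpa using pvReplaceGo_eq_rpl o c s.length s [] le_rfl

theorem pvRpl_length_le (o c : Char) : ∀ l : List Char, (pvRpl o c l).length ≤ l.length := by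
  suffices H : ∀ (n : Nat) (l : List Char), l.length ≤ n → (pvRpl o c l).length ≤ l.length from
    fun l => H l.length l le_rfl
  intro n
  induction n with
  | zero => intro l h; have : l = [] := by cases l <;> simp_all
            subst this; simp [pvRpl]
  | succ n ih =>
    intro l h
    rcases l with _ | ⟨a, _ | ⟨b, t⟩⟩
    · simp [pvRpl]
    · simp [pvRpl]
    · simp only [List.length_cons] at h
      by_cases hab : a = o ∧ b = c
      · simp only [pvRpl, if_pos hab]
        have := ih t (by omega)
        simp; omega
      · simp only [pvRpl, if_neg hab]
        have := ih (b :: t) (by simp; omega)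
        simp at *; omega

theorem pvRpl_length_lt (o c : Char) :
    ∀ l : List Char, [o, c] <:+: l → (pvRpl o c l).length < l.length := by
  suffices H : ∀ (n : Nat) (l : List Char), l.length ≤ n → [o, c] <:+: l →
      (pvRpl o c l).length < l.length from fun l => H l.length l le_rfl
  intro n
  induction n with
  | zero =>
    intro l h hinf
    have : l = [] := by cases l <;> simp_all
    subst this
    have := hinf.length_le
    simp at this
  | succ n ih =>
    intro l h hinf
    rcases l with _ | ⟨a, _ | ⟨b, t⟩⟩
    · have := hinf.length_le; simp at this
    · have := hinf.length_le; simp at this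
    · simp only [List.length_cons] at h
      by_cases hab : a = o ∧ b = c
      · simp only [pvRpl, if_pos hab]
        have := pvRpl_length_le o c t
        simp; omega
      · simp only [pvRpl, if_neg hab]
        have htail : [o, c] <:+: (b :: t) := by
          rcases (List.infix_cons_iff).1 hinf with hpre | hh
          · exfalso
            rcases hpre with ⟨r, hr⟩
            simp at hr
            exact hab ⟨hr.1.symm, hr.2.1.symm⟩
          · exact hh
        have := ih (b :: t) (by simp; omega) htail
        simp at *; omega

theorem pvReplace_length_lt (o c : Char) (s : List Char)
    (h : PySem.Chars.isIn [o, c] s = true) :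
    (PySem.Chars.replace s [o, c] []).length < s.length := by
  rw [pvReplace_eq_rpl]
  exact pvRpl_length_lt o c s ((PySem.Chars.isIn_iff_infix _ _).1 h)

-- adjacent-pair predicate: no matched pair on consecutive characters
def pvNoPair (a b : Char) : Prop := pvPairOf a ≠ some b

-- ---- character-class facts ----
theorem pvPairOf_eq_some (t x : Char) (h : pvPairOf t = some x) :
    x = ')' ∨ x = ']' ∨ x = '}' ∨ x = '>' := by
  unfold pvPairOf at h
  split_ifs at h <;> simp_all [eq_comm]

theorem pvPairOf_isSome_iff (t : Char) :
    (pvPairOf t).isSome ↔ (t = '(' ∨ t = '[' ∨ t = '{' ∨ t = '<') := by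
  unfold pvPairOf
  split_ifs <;> simp_all

theorem pvScoreOf_isSome_iff (b : Char) :
    (pvScoreOf b).isSome ↔ (b = ')' ∨ b = ']' ∨ b = '}' ∨ b = '>') := by
  unfold pvScoreOf
  split_ifs <;> simp_all

theorem pvStep_push_opener (st : List Char) (o : Char) (ho : (pvPairOf o).isSome) :
    pvStep st o = o :: st := by
  cases st with
  | nil => rfl
  | cons t st' =>
    rw [pvStep, if_neg]
    intro h
    rcases pvPairOf_eq_some t o h with rfl | rfl | rfl | rfl <;> simp [pvPairOf] at ho

-- ---- erasing a matched pair does not change the final stack ----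
theorem pvFoldl_step_rpl (o c : Char) (hoc : pvPairOf o = some c) :
    ∀ (l st : List Char), List.foldl pvStep st (pvRpl o c l) = List.foldl pvStep st l := by
  suffices H : ∀ (n : Nat) (l : List Char), l.length ≤ n → ∀ st,
      List.foldl pvStep st (pvRpl o c l) = List.foldl pvStep st l from
    fun l st => H l.length l le_rfl st
  intro n
  induction n with
  | zero =>
    intro l h st
    have : l = [] := by cases l <;> simp_all
    subst this; rfl
  | succ n ih =>
    intro l h st
    rcases l with _ | ⟨a, _ | ⟨b, t⟩⟩
    · rfl
    · rfl
    · simp only [List.length_cons] at h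
      by_cases hab : a = o ∧ b = c
      · obtain ⟨rfl, rfl⟩ := hab
        have hr : pvRpl a b (a :: b :: t) = pvRpl a b t := by simp [pvRpl]
        rw [hr, ih t (by omega) st]
        simp only [List.foldl_cons]
        rw [pvStep_push_opener st a (by simp [hoc]), pvStep, if_pos hoc]
      · simp only [pvRpl, if_neg hab, List.foldl_cons]
        exact ih (b :: t) (by simp; omega) (pvStep st a)

-- ---- a string with no adjacent matched pair is its own reduction ----
theorem pvFoldl_step_of_noPair :
    ∀ (r st : List Char), List.IsChain pvNoPair r →
      (∀ t hd, st.head? = some t → r.head? = some hd → pvPairOf t ≠ some hd) →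
      List.foldl pvStep st r = r.reverse ++ st := by
  intro r
  induction r with
  | nil => intro st _ _; simp
  | cons hd r' ih =>
    intro st hchain hglue
    have hstep : pvStep st hd = hd :: st := by
      cases st with
      | nil => rfl
      | cons t st' => rw [pvStep, if_neg (hglue t hd rfl rfl)]
    simp only [List.foldl_cons, hstep]
    rw [ih (hd :: st) hchain.tail ?_]
    · simp
    · intro t hd' ht hhd'
      simp only [List.head?_cons, Option.some_inj] at ht
      subst ht
      exact hchain.rel_head? (by simp [hhd'])

-- ---- no substring "oc" anywhere ⇒ no adjacent matched pair ----
theorem pvNoPair_of_four :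
    ∀ x : List Char,
      ¬(['(', ')'] <:+: x) → ¬(['[', ']'] <:+: x) →
      ¬(['{', '}'] <:+: x) → ¬(['<', '>'] <:+: x) →
      List.IsChain pvNoPair x := by
  intro x
  induction x with
  | nil => intro _ _ _ _; exact List.IsChain.nil
  | cons a t ih =>
    intro h1 h2 h3 h4
    cases t with
    | nil => exact List.isChain_singleton a
    | cons b t' =>
      have htail : ∀ p : List Char, p <:+: (b :: t') → p <:+: (a :: b :: t') :=
        fun p hp => hp.trans (List.suffix_cons a (b :: t')).isInfix
      refine List.IsChain.cons_cons ?_ (ih (fun hh => h1 (htail _ hh))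
        (fun hh => h2 (htail _ hh)) (fun hh => h3 (htail _ hh)) (fun hh => h4 (htail _ hh)))
      intro hp
      have hb := pvPairOf_eq_some a b hp
      unfold pvPairOf at hp
      split_ifs at hp with ha1 ha2 ha3 ha4
      · cases hp; exact h1 ⟨[], t', by simp [ha1]⟩
      · cases hp; exact h2 ⟨[], t', by simp [ha2]⟩
      · cases hp; exact h3 ⟨[], t', by simp [ha3]⟩
      · cases hp; exact h4 ⟨[], t', by simp [ha4]⟩

-- ---- the while-loop computes the one-pass reduction's normal form ----
theorem pvReduceLoop_foldl :
    ∀ (fuel : Nat) (x : List Char), x.length < fuel → ∀ st,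
      List.foldl pvStep st (pvReduceLoop fuel x) = List.foldl pvStep st x := by
  intro fuel
  induction fuel with
  | zero => intro x h; omega
  | succ n ih =>
    intro x h st
    rw [pvReduceLoop]
    split_ifs with h1 h2 h3 h4
    · rw [ih _ (by have := pvReplace_length_lt '(' ')' x h1; omega) st,
        pvReplace_eq_rpl]
      exact pvFoldl_step_rpl '(' ')' rfl x st
    · rw [ih _ (by have := pvReplace_length_lt '[' ']' x h2; omega) st,
        pvReplace_eq_rpl]
      exact pvFoldl_step_rpl '[' ']' rfl x st
    · rw [ih _ (by have := pvReplace_length_lt '{' '}' x h3; omega) st,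
        pvReplace_eq_rpl]
      exact pvFoldl_step_rpl '{' '}' rfl x st
    · rw [ih _ (by have := pvReplace_length_lt '<' '>' x h4; omega) st,
        pvReplace_eq_rpl]
      exact pvFoldl_step_rpl '<' '>' rfl x st
    · rfl

theorem pvReduceLoop_noPair :
    ∀ (fuel : Nat) (x : List Char), x.length < fuel →
      List.IsChain pvNoPair (pvReduceLoop fuel x) := by
  intro fuel
  induction fuel with
  | zero => intro x h; omega
  | succ n ih =>
    intro x h
    rw [pvReduceLoop]
    split_ifs with h1 h2 h3 h4
    · exact ih _ (by have := pvReplace_length_lt '(' ')' x h1; omega)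
    · exact ih _ (by have := pvReplace_length_lt '[' ']' x h2; omega)
    · exact ih _ (by have := pvReplace_length_lt '{' '}' x h3; omega)
    · exact ih _ (by have := pvReplace_length_lt '<' '>' x h4; omega)
    · exact pvNoPair_of_four x
        (fun hh => h1 ((PySem.Chars.isIn_iff_infix _ _).2 hh))
        (fun hh => h2 ((PySem.Chars.isIn_iff_infix _ _).2 hh))
        (fun hh => h3 ((PySem.Chars.isIn_iff_infix _ _).2 hh))
        (fun hh => h4 ((PySem.Chars.isIn_iff_infix _ _).2 hh))

theorem pvReduceLoop_eq_normal (x : List Char) :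
    pvReduceLoop (x.length + 1) x = pvNormal x := by
  have h1 := pvReduceLoop_foldl (x.length + 1) x (by omega) []
  have h2 := pvFoldl_step_of_noPair (pvReduceLoop (x.length + 1) x) []
    (pvReduceLoop_noPair (x.length + 1) x (by omega))
    (by intro t hd ht _; simp at ht)
  unfold pvNormal
  rw [← h1, h2]
  simp

-- ---- A's index scan equals B's adjacent-pair scan ----
theorem pvScanPairs_short (l : List Char) (h : l.length ≤ 1) : pvScanPairs l = 0 := by
  rcases l with _ | ⟨a, _ | ⟨b, t⟩⟩ <;> simp_all [pvScanPairs]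

theorem pvScoring_iff (a b : Char) :
    ((pvPairOf a).isSome ∧ (pvScoreOf b).isSome ∧ pvPairOf a ≠ some b) ↔
      ((b = ')' ∧ (a = '[' ∨ a = '{' ∨ a = '<')) ∨
       (b = ']' ∧ (a = '(' ∨ a = '{' ∨ a = '<')) ∨
       (b = '}' ∧ (a = '(' ∨ a = '[' ∨ a = '<')) ∨
       (b = '>' ∧ (a = '(' ∨ a = '{' ∨ a = '['))) := by
  constructor
  · rintro ⟨hpa, hsb, hne⟩
    rcases (pvPairOf_isSome_iff a).1 hpa with rfl | rfl | rfl | rfl <;>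
      rcases (pvScoreOf_isSome_iff b).1 hsb with rfl | rfl | rfl | rfl <;>
        first
        | exact absurd rfl hne
        | decide
  · rintro (⟨rfl, rfl | rfl | rfl⟩ | ⟨rfl, rfl | rfl | rfl⟩ |
            ⟨rfl, rfl | rfl | rfl⟩ | ⟨rfl, rfl | rfl | rfl⟩) <;> decide

theorem pvScanA_eq_scanPairs (x : List Char) :
    ∀ (fuel y : Nat), 1 ≤ y → x.length ≤ fuel + y →
      pvScanA x fuel y = pvScanPairs (x.drop (y - 1)) := by
  intro fuel
  induction fuel with
  | zero =>
    intro y h1 hf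
    rw [pvScanA, pvScanPairs_short _ (by rw [List.length_drop]; omega)]
  | succ n ih =>
    intro y h1 hf
    by_cases h : y < x.length
    · have hprev : y - 1 < x.length := by omega
      have hy1 : y - 1 + 1 = y := by omega
      have hdrop1 : x.drop (y - 1) = x[y - 1] :: x.drop y := by
        rw [List.drop_eq_getElem_cons hprev, hy1]
      have hdrop2 : x.drop y = x[y] :: x.drop (y + 1) := List.drop_eq_getElem_cons h
      rw [pvScanA, dif_pos h, hdrop1, hdrop2, pvScanPairs]
      by_cases hs : (pvPairOf x[y - 1]).isSome ∧ (pvScoreOf x[y]).isSome ∧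
          pvPairOf x[y - 1] ≠ some x[y]
      · rw [if_pos hs]
        rcases (pvScoring_iff x[y - 1] x[y]).1 hs with ⟨e, f⟩ | ⟨e, f⟩ | ⟨e, f⟩ | ⟨e, f⟩ <;>
          · rw [e]
            simp only [pvScoreOf]
            split_ifs <;> simp_all
      · rw [if_neg hs]
        have n1 : ¬(x[y] = ')' ∧ (x[y - 1] = '[' ∨ x[y - 1] = '{' ∨ x[y - 1] = '<')) :=
          fun hc => hs ((pvScoring_iff _ _).2 (Or.inl hc))
        have n2 : ¬(x[y] = ']' ∧ (x[y - 1] = '(' ∨ x[y - 1] = '{' ∨ x[y - 1] = '<')) :=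
          fun hc => hs ((pvScoring_iff _ _).2 (Or.inr (Or.inl hc)))
        have n3 : ¬(x[y] = '}' ∧ (x[y - 1] = '(' ∨ x[y - 1] = '[' ∨ x[y - 1] = '<')) :=
          fun hc => hs ((pvScoring_iff _ _).2 (Or.inr (Or.inr (Or.inl hc))))
        have n4 : ¬(x[y] = '>' ∧ (x[y - 1] = '(' ∨ x[y - 1] = '{' ∨ x[y - 1] = '[')) :=
          fun hc => hs ((pvScoring_iff _ _).2 (Or.inr (Or.inr (Or.inr hc))))
        rw [if_neg n1, if_neg n2, if_neg n3, if_neg n4, ← hdrop2]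
        have := ih (y + 1) (by omega) (by omega)
        rw [this]
        simp
    · rw [pvScanA, dif_neg h, pvScanPairs_short _ (by rw [List.length_drop]; omega)]

-- ---- per-line equality ----
theorem pvLine_eq (l : List Char) :
    pvScanA (pvReduceLoop (l.length + 1) l) (pvReduceLoop (l.length + 1) l).length 1
      = pvScanPairs (pvNormal l) := by
  rw [pvScanA_eq_scanPairs (pvReduceLoop (l.length + 1) l) _ 1 le_rfl (by omega),
    pvReduceLoop_eq_normal]
  simp

-- ===== VERDICT (by name: the statement is the Claim_ definition above) =====
theorem part1_spec : Claim_equal_part1 := by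
  intro lines _
  unfold Spec_part1 part1 part1_alt
  rw [PySem.List.foldl_add lines
    (fun x =>
      pvScanA (pvReduceLoop (x.toList.length + 1) x.toList)
        (pvReduceLoop (x.toList.length + 1) x.toList).length 1) 0,
    PySem.List.foldl_add lines (fun line => pvScanPairs (pvNormal line.toList)) 0]
  simp only [zero_add]
  exact congrArg List.sum (List.map_congr_left (fun x _ => pvLine_eq x.toList))
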